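-- pv_equiv track=rewrite | github.com/MrBrantCode/unitest_baseline | mut_generate/mist_train_cf/cf_80676/solution.py | corrected_sequence
-- ===== SOURCE A (Python) =====
-- def corrected_sequence(array):
--     output_array = []
--     output_indices = []
--     sequence = [array[0]]
--     indices = [0]
--     for i in range(1, len(array)):
--         if sequence[-1] < array[i]:
--             sequence.append(array[i])
--             indices.append(i)
--         elif sequence[-1] >= array[i]:
--             if len(sequence) > len(output_array):
--                 output_array = sequence[:]
--                 output_indices = indices[:]
--             sequence = [array[i]]
--             indices = [i]
--     if len(sequence) > len(output_array):
--         output_array = sequence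
--         output_indices = indices
--     return output_array, output_indices
-- ===== SOURCE B (Python) =====
-- def corrected_sequence(array):
--     n = len(array)
--     breaks = [0] + [i for i in range(1, n) if array[i - 1] >= array[i]] + [n]
--     best_s, best_e = 0, 0
--     for s, e in zip(breaks, breaks[1:]):
--         if e - s > best_e - best_s:
--             best_s, best_e = s, e
--     return list(array[best_s:best_e]), list(range(best_s, best_e))
-- ===== Notes on version B (the rewrite author's own statement) =====
-- stated objective: alternative
-- what changed: B first computes the list of run break positions in one pass and then scans consecutive boundary pairs for the longest segment, reconstructing the answer by slicing, instead of A's growing parallel value/index lists with copy-on-improve.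
import Mathlib
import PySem

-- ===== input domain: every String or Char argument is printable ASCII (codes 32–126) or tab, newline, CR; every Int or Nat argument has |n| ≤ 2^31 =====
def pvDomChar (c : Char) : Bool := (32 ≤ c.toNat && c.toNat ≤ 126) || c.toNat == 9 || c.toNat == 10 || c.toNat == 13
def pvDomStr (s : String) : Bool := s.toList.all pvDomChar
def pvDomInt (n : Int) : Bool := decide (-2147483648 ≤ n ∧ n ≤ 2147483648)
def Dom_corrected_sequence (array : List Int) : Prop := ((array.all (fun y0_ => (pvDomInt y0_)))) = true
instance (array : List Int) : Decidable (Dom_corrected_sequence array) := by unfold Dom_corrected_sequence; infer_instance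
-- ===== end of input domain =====

-- B replaces A's copy-on-improve parallel value/index lists by a break-position list scanned
-- in boundary pairs, then slices the answer out; alternative decomposition, same cost.

-- ===== PORT A =====
-- the first-element read is pyGetD with default 0: Python raises IndexError on the empty list, excluded by Pre_.
def corrected_sequence (array : List Int) : List Int × List Int :=
  let st := (PySem.List.pyRange 1 (array.length : Int) 1).foldl
    (fun (st : (List Int × List Int) × (List Int × List Int)) i =>
      if PySem.List.pyGetD st.2.1 (-1) 0 < PySem.List.pyGetD array i 0 then
        (st.1, (st.2.1 ++ [PySem.List.pyGetD array i 0], st.2.2 ++ [i]))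
      else if PySem.List.pyGetD st.2.1 (-1) 0 ≥ PySem.List.pyGetD array i 0 then
        (if st.2.1.length > st.1.1.length then st.2 else st.1,
         ([PySem.List.pyGetD array i 0], [i]))
      else st)
    ((([], []), ([PySem.List.pyGetD array 0 0], [(0 : Int)])))
  if st.2.1.length > st.1.1.length then st.2 else st.1

-- ===== PORT B =====
def corrected_sequence_alt (array : List Int) : List Int × List Int :=
  let n : Int := (array.length : Int)
  let breaks : List Int :=
    [0] ++ ((PySem.List.pyRange 1 n 1).filter
      (fun i => decide (PySem.List.pyGetD array (i - 1) 0 ≥ PySem.List.pyGetD array i 0))) ++ [n]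
  let p := (breaks.zip breaks.tail).foldl
    (fun (p : Int × Int) se => if se.2 - se.1 > p.2 - p.1 then se else p) ((0 : Int), (0 : Int))
  (PySem.List.slice array (some p.1) (some p.2), PySem.List.pyRange p.1 p.2 1)

-- ===== PRECONDITION & SPEC =====
-- Pre_ excludes only the empty list, on which the Python A raises IndexError reading the first element.
def Pre_corrected_sequence (array : List Int) : Prop := array ≠ []
instance (array : List Int) : Decidable (Pre_corrected_sequence array) := by
  unfold Pre_corrected_sequence; infer_instance
def pvWitness_corrected_sequence : List Int := [3, 1, 2]
def Spec_corrected_sequence (array : List Int) (out : List Int × List Int) : Prop :=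
  out = corrected_sequence_alt array
instance (array : List Int) (out : List Int × List Int) : Decidable (Spec_corrected_sequence array out) := by
  unfold Spec_corrected_sequence; infer_instance

-- ===== CLAIM (what is proved, stated in full; the proofs are below) =====
def Claim_equal_corrected_sequence : Prop := ∀ (array : List Int), Dom_corrected_sequence array →
  Pre_corrected_sequence array → Spec_corrected_sequence array (corrected_sequence array)

-- ===== LEMMAS AND PROOFS =====

-- the break predicate: array[i-1] >= array[i]
def pvPred (array : List Int) (i : Int) : Bool :=
  decide (PySem.List.pyGetD array (i - 1) 0 ≥ PySem.List.pyGetD array i 0)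

-- break positions among 1..k-1, with the leading 0
def pvBrk (array : List Int) (k : Int) : List Int :=
  0 :: (PySem.List.pyRange 1 k 1).filter (pvPred array)

def pvCur (array : List Int) (k : Int) : Int :=
  (pvBrk array k).getLastD 0

def pvStep (p se : Int × Int) : Int × Int := if se.2 - se.1 > p.2 - p.1 then se else p

def pvBest (array : List Int) (k : Int) : Int × Int :=
  ((pvBrk array k).zip (pvBrk array k).tail).foldl pvStep (0, 0)

def pvSeg (array : List Int) (s e : Int) : List Int × List Int :=
  (PySem.List.slice array (some s) (some e), PySem.List.pyRange s e 1)

def pvBodyA (array : List Int) (st : (List Int × List Int) × (List Int × List Int)) (i : Int) :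
    (List Int × List Int) × (List Int × List Int) :=
  if PySem.List.pyGetD st.2.1 (-1) 0 < PySem.List.pyGetD array i 0 then
    (st.1, (st.2.1 ++ [PySem.List.pyGetD array i 0], st.2.2 ++ [i]))
  else if PySem.List.pyGetD st.2.1 (-1) 0 ≥ PySem.List.pyGetD array i 0 then
    (if st.2.1.length > st.1.1.length then st.2 else st.1,
     ([PySem.List.pyGetD array i 0], [i]))
  else st

def pvInitA (array : List Int) : (List Int × List Int) × (List Int × List Int) :=
  (([], []), ([PySem.List.pyGetD array 0 0], [(0 : Int)]))

lemma pvA_unfold (array : List Int) : corrected_sequence array =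
    (let st := (PySem.List.pyRange 1 (array.length : Int) 1).foldl (pvBodyA array) (pvInitA array)
     if st.2.1.length > st.1.1.length then st.2 else st.1) := rfl

lemma pvSlice_length (array : List Int) (s e : Int) (h0 : 0 ≤ s) (hse : s ≤ e)
    (hen : e ≤ (array.length : Int)) :
    (PySem.List.slice array (some s) (some e)).length = (e - s).toNat := by
  rw [PySem.List.slice_toNat array h0 (by omega)]
  simp only [List.length_take, List.length_drop]
  omega

lemma pvSlice_last (array : List Int) (s e : Int) (h0 : 0 ≤ s) (hse : s < e)
    (hen : e ≤ (array.length : Int)) :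
    PySem.List.pyGetD (PySem.List.slice array (some s) (some e)) (-1) 0 =
      PySem.List.pyGetD array (e - 1) 0 := by
  have h1 : PySem.List.slice array (some s) (some e) =
      List.take (e.toNat - s.toNat) (List.drop s.toNat array) :=
    PySem.List.slice_toNat array h0 (by omega)
  have hne : PySem.List.slice array (some s) (some e) ≠ [] := by
    rw [h1]; intro hnil
    have := congrArg List.length hnil
    simp at this; omega
  rw [PySem.List.pyGetD_neg_one _ _ hne,
      PySem.List.pyGetD_eq_getElem array 0 (by omega) (by omega),
      List.getLast_eq_getElem]
  simp only [h1, List.length_take, List.length_drop, List.getElem_take, List.getElem_drop]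
  congr 1
  omega

lemma pvSlice_snoc (array : List Int) (s e : Int) (h0 : 0 ≤ s) (hse : s ≤ e)
    (hen : e < (array.length : Int)) :
    PySem.List.slice array (some s) (some e) ++ [PySem.List.pyGetD array e 0] =
      PySem.List.slice array (some s) (some (e + 1)) := by
  rw [PySem.List.slice_toNat array h0 (by omega), PySem.List.slice_toNat array h0 (by omega)]
  have h1 : (e + 1).toNat - s.toNat = (e.toNat - s.toNat) + 1 := by omega
  rw [h1, List.take_add_one]
  congr 1
  rw [List.getElem?_drop]
  have h2 : s.toNat + (e.toNat - s.toNat) = e.toNat := by omega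
  rw [h2, List.getElem?_eq_getElem (by omega)]
  rw [PySem.List.pyGetD_eq_getElem array 0 (by omega) (by omega)]
  simp

lemma pvZip_pairs_snoc {α : Type} (l : List α) (h : l ≠ []) (x d : α) :
    (l ++ [x]).zip (l ++ [x]).tail = l.zip l.tail ++ [(l.getLastD d, x)] := by
  induction l with
  | nil => exact absurd rfl h
  | cons a t ih =>
    cases t with
    | nil => simp
    | cons b t' =>
      simp only [List.cons_append, List.tail_cons, List.zip_cons_cons] at *
      rw [ih (by simp)]
      simp

lemma pvBrk_succ (array : List Int) (k : Int) (hk : 1 ≤ k) :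
    pvBrk array (k + 1) = pvBrk array k ++ (if pvPred array k then [k] else []) := by
  unfold pvBrk
  rw [PySem.List.pyRange_one_succ_right (by omega), List.filter_append, List.filter_singleton]
  cases hp : pvPred array k <;> simp

lemma pvSlice_single (array : List Int) (k : Int) (h0 : 0 ≤ k) (hk : k < (array.length : Int)) :
    PySem.List.slice array (some k) (some (k + 1)) = [PySem.List.pyGetD array k 0] := by
  rw [PySem.List.slice_toNat array h0 (by omega)]
  have h1 : (k + 1).toNat - k.toNat = 1 := by omega
  rw [h1, PySem.List.pyGetD_eq_getElem array 0 h0 hk]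
  exact List.take_one_drop_eq_of_lt_length (by omega)

lemma pvBrk_one (array : List Int) : pvBrk array 1 = [0] := by
  unfold pvBrk
  rw [PySem.List.pyRange_one_eq_nil le_rfl]
  rfl

-- main invariant: A's loop state after processing range(1, k) is the best completed
-- segment (as a slice/range pair) together with the current run
lemma pvInv (array : List Int) (h : array ≠ []) :
    ∀ k : Nat, 1 ≤ k → k ≤ array.length →
    ((PySem.List.pyRange 1 (k : Int) 1).foldl (pvBodyA array) (pvInitA array) =
       (pvSeg array (pvBest array k).1 (pvBest array k).2,
        pvSeg array (pvCur array k) k)) ∧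
    0 ≤ (pvBest array k).1 ∧ (pvBest array k).1 ≤ (pvBest array k).2 ∧
    (pvBest array k).2 ≤ pvCur array k ∧ 0 ≤ pvCur array k ∧ pvCur array k ≤ (k : Int) - 1 := by
  have hlenpos : 0 < array.length := List.length_pos_of_ne_nil h
  intro k
  induction k with
  | zero => omega
  | succ k ih =>
    intro _ hk1
    by_cases hk0 : k = 0
    · -- base case k+1 = 1
      subst hk0
      have hone : ((0 + 1 : Nat) : Int) = 1 := by norm_num
      rw [hone]
      have hb : pvBrk array (1 : Int) = [0] := pvBrk_one array
      have hcur : pvCur array 1 = 0 := by unfold pvCur; rw [hb]; rfl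
      have hbest : pvBest array 1 = (0, 0) := by unfold pvBest; rw [hb]; rfl
      rw [PySem.List.pyRange_one_eq_nil le_rfl]
      refine ⟨?_, ?_⟩
      · simp only [List.foldl_nil, hbest, hcur]
        have hs00 : pvSeg array 0 0 = ([], []) := by
          unfold pvSeg
          rw [PySem.List.slice_toNat array le_rfl le_rfl, PySem.List.pyRange_one_eq_nil le_rfl]
          simp
        have hs01 : pvSeg array 0 1 = ([PySem.List.pyGetD array 0 0], [0]) := by
          unfold pvSeg
          have h1 := pvSlice_single array 0 le_rfl (by exact_mod_cast hlenpos)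
          norm_num at h1
          have h2 := PySem.List.pyRange_one_singleton (0 : Int)
          norm_num at h2
          simp only [PySem.List.slice_zero_start]
          rw [h1, h2]
        rw [hs00, hs01]
        rfl
      · rw [hbest, hcur]
        norm_num
    · -- step case: k ≥ 1
      have hk : 1 ≤ k := by omega
      obtain ⟨hfold, hb1, hb12, hb2c, hc0, hck⟩ := ih (by omega) (by omega)
      have hklen : (k : Int) < (array.length : Int) := by exact_mod_cast hk1
      have hcast : ((k + 1 : Nat) : Int) = (k : Int) + 1 := by push_cast; ring
      rw [hcast]
      have hrange : PySem.List.pyRange 1 ((k : Int) + 1) 1 =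
          PySem.List.pyRange 1 (k : Int) 1 ++ [(k : Int)] :=
        PySem.List.pyRange_one_succ_right (by omega)
      rw [hrange, List.foldl_append, hfold]
      have hlast : PySem.List.pyGetD (PySem.List.slice array (some (pvCur array k))
          (some (k : Int))) (-1) 0 = PySem.List.pyGetD array ((k : Int) - 1) 0 :=
        pvSlice_last array _ _ hc0 (by omega) (by omega)
      have hbrksucc := pvBrk_succ array (k : Int) (by exact_mod_cast hk)
      by_cases hPQ : PySem.List.pyGetD array ((k : Int) - 1) 0 <
          PySem.List.pyGetD array (k : Int) 0
      · -- array[k-1] < array[k]: the run continues, breaks unchanged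
        have hpred : pvPred array (k : Int) = false := by
          simp only [pvPred, decide_eq_false_iff_not]
          omega
        have hbrk : pvBrk array ((k : Int) + 1) = pvBrk array (k : Int) := by
          rw [hbrksucc, hpred]
          simp
        have hcur : pvCur array ((k : Int) + 1) = pvCur array (k : Int) := by
          unfold pvCur
          rw [hbrk]
        have hbest : pvBest array ((k : Int) + 1) = pvBest array (k : Int) := by
          unfold pvBest
          rw [hbrk]
        simp only [List.foldl_cons, List.foldl_nil, pvBodyA, pvSeg, hlast]
        rw [if_pos hPQ, hcur, hbest]
        refine ⟨?_, hb1, hb12, hb2c, hc0, by omega⟩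
        rw [pvSlice_snoc array _ _ hc0 (by omega) hklen,
            PySem.List.pyRange_one_succ_right (by omega)]
      · -- array[k-1] >= array[k]: the run breaks at k
        have hge : PySem.List.pyGetD array ((k : Int) - 1) 0 ≥
            PySem.List.pyGetD array (k : Int) 0 := by omega
        have hpred : pvPred array (k : Int) = true := by
          simp only [pvPred, decide_eq_true_eq]
          omega
        have hbrk : pvBrk array ((k : Int) + 1) = pvBrk array (k : Int) ++ [(k : Int)] := by
          rw [hbrksucc, hpred]
          simp
        have hcur : pvCur array ((k : Int) + 1) = (k : Int) := by
          unfold pvCur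
          rw [hbrk]
          simp
        have hbest : pvBest array ((k : Int) + 1) =
            pvStep (pvBest array (k : Int)) (pvCur array (k : Int), (k : Int)) := by
          unfold pvBest
          rw [hbrk, pvZip_pairs_snoc _ (by simp [pvBrk]) _ 0, List.foldl_append]
          rfl
        have hlen2 : (PySem.List.slice array (some (pvCur array (k : Int)))
            (some (k : Int))).length = ((k : Int) - pvCur array (k : Int)).toNat :=
          pvSlice_length array _ _ hc0 (by omega) (by omega)
        have hlen1 : (PySem.List.slice array (some (pvBest array (k : Int)).1)
            (some (pvBest array (k : Int)).2)).length =
            ((pvBest array (k : Int)).2 - (pvBest array (k : Int)).1).toNat :=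
          pvSlice_length array _ _ hb1 hb12 (by omega)
        have hs1 : PySem.List.slice array (some (k : Int)) (some ((k : Int) + 1)) =
            [PySem.List.pyGetD array (k : Int) 0] :=
          pvSlice_single array _ (by omega) hklen
        have hs2 : PySem.List.pyRange (k : Int) ((k : Int) + 1) 1 = [(k : Int)] :=
          PySem.List.pyRange_one_singleton _
        simp only [List.foldl_cons, List.foldl_nil, pvBodyA, pvSeg, hlast]
        rw [if_neg hPQ, if_pos hge, hcur, hbest, hlen2, hlen1, hs1, hs2]
        unfold pvStep
        constructor
        · split_ifs <;> first | rfl | omega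
        · split_ifs <;> refine ⟨by omega, by omega, by omega, by omega, by omega⟩
-- B's port rewritten through the proof-side vocabulary
lemma pvB_eq (array : List Int) :
    corrected_sequence_alt array =
      pvSeg array
        (pvStep (pvBest array (array.length : Int))
          (pvCur array (array.length : Int), (array.length : Int))).1
        (pvStep (pvBest array (array.length : Int))
          (pvCur array (array.length : Int), (array.length : Int))).2 := by
  have hne : pvBrk array (array.length : Int) ≠ [] := by simp [pvBrk]
  have hzip := pvZip_pairs_snoc (pvBrk array (array.length : Int)) hne (array.length : Int) 0
  simp only [pvBrk] at hzip
  unfold corrected_sequence_alt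
  dsimp only
  simp only [List.cons_append, List.nil_append] at hzip ⊢
  rw [show (fun i => decide (PySem.List.pyGetD array (i - 1) 0 ≥ PySem.List.pyGetD array i 0)) =
        pvPred array from rfl, hzip, List.foldl_append]
  rfl

-- ===== VERDICT (by name: the statement is the Claim_ definition above) =====
theorem corrected_sequence_spec : Claim_equal_corrected_sequence := by
  intro array _ hpre
  have hpre' : array ≠ [] := hpre
  have hlenpos : 0 < array.length := List.length_pos_of_ne_nil hpre'
  unfold Spec_corrected_sequence
  obtain ⟨hfold, hb1, hb12, hb2c, hc0, hck⟩ := pvInv array hpre' array.length (by omega) le_rfl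
  rw [pvA_unfold, pvB_eq array]
  simp only [hfold]
  have hn1 : (1 : Int) ≤ (array.length : Int) := by exact_mod_cast hlenpos
  have hlen2 : (pvSeg array (pvCur array (array.length : Int)) (array.length : Int)).1.length =
      ((array.length : Int) - pvCur array (array.length : Int)).toNat :=
    pvSlice_length array _ _ hc0 (by omega) le_rfl
  have hlen1 : (pvSeg array (pvBest array (array.length : Int)).1
      (pvBest array (array.length : Int)).2).1.length =
      ((pvBest array (array.length : Int)).2 - (pvBest array (array.length : Int)).1).toNat :=
    pvSlice_length array _ _ hb1 hb12 (by omega)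
  simp only [hlen2, hlen1, pvStep]
  split_ifs <;> first | rfl | omega
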